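-- pv_equiv track=rewrite | github.com/marcsze/NewPythonPrograms | MergebyConsesusShared.py | combineDuplicates
-- ===== SOURCE A (Python) =====
-- def combineDuplicates(finalizedCompletedMatch, TestSequenceCount):
-- 	OTUDict = {}
-- 	for i in finalizedCompletedMatch:
-- 		otuID = finalizedCompletedMatch[i]
-- 		counts = TestSequenceCount[i]
-- 		tempStorage = {}
-- 		if otuID in OTUDict:
-- 			storedCounts = OTUDict[otuID]
-- 			for j in storedCounts:
-- 				tempStorage[j] = counts[j] + storedCounts[j]
-- 			OTUDict[otuID] = tempStorage
-- 		else: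
-- 			OTUDict[otuID] = counts
--
-- 	return OTUDict
-- ===== SOURCE B (Python) =====
-- def combineDuplicates(finalizedCompletedMatch, TestSequenceCount):
-- 	# Two-pass: group the count-dicts by otuID, then sum each group over the
-- 	# first entry's keys (single-entry groups keep the original counts object).
-- 	groups = {}
-- 	for i in finalizedCompletedMatch:
-- 		groups.setdefault(finalizedCompletedMatch[i], []).append(TestSequenceCount[i])
-- 	result = {}
-- 	for otu, lst in groups.items():
-- 		base = lst[0]
-- 		if len(lst) == 1:
-- 			result[otu] = base
-- 		else:
-- 			result[otu] = {j: sum(c[j] for c in lst) for j in base}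
-- 	return result
-- ===== Notes on version B (the rewrite author's own statement) =====
-- stated objective: alternative
-- what changed: A merges eagerly in one pass, rebuilding a pairwise-summed dict every time an OTU repeats; B first groups all count-dicts by otuID (setdefault/append) and then, in a second pass, produces each result dict with a single comprehension summing over the whole group (single-entry groups keep the original counts object).
import Mathlib
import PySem

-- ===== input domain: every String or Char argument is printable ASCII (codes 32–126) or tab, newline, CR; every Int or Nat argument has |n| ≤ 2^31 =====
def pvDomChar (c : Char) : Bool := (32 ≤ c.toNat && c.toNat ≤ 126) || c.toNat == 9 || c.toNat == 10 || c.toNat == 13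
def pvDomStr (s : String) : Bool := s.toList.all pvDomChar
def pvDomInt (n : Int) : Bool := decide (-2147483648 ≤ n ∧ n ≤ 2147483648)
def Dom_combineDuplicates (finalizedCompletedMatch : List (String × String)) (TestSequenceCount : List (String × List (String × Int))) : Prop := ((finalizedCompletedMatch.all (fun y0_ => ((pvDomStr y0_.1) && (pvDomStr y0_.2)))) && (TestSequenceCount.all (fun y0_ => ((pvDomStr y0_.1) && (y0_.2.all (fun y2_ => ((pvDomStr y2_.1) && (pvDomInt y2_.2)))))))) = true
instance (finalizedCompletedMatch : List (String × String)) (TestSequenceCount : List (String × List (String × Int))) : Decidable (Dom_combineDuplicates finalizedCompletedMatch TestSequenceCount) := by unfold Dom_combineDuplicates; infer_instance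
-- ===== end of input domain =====

-- B replaces A's one-pass eager pairwise dict-merging with two passes (group the
-- count-dicts by otuID, then sum each group in one comprehension); objective: alternative decomposition.

-- ===== PORT A =====
-- inner loop 'for j in storedCounts: tempStorage[j] = counts[j] + storedCounts[j]' then 'OTUDict[otuID] = tempStorage'
def pvMerge (counts stored : List (String × Int)) : List (String × Int) :=
  (stored.foldl
    (fun (t : PySem.Dict String Int) j =>
      t.insert j.1 ((PySem.Dict.mk counts).getD j.1 0 + (PySem.Dict.mk stored).getD j.1 0))
    PySem.Dict.empty).items

-- dict lookups d[i] are total here via getD; Pre_ keeps exactly the inputs where Python raises no KeyError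
def combineDuplicates (finalizedCompletedMatch : List (String × String)) (TestSequenceCount : List (String × List (String × Int))) : List (String × List (String × Int)) :=
  ((finalizedCompletedMatch.map (fun p => p.1)).foldl
    (fun (OTUDict : PySem.Dict String (List (String × Int))) i =>
      let otuID := (PySem.Dict.mk finalizedCompletedMatch).getD i ""
      let counts := (PySem.Dict.mk TestSequenceCount).getD i []
      if OTUDict.contains otuID then
        OTUDict.insert otuID (pvMerge counts (OTUDict.getD otuID []))
      else
        OTUDict.insert otuID counts)
    PySem.Dict.empty).items

-- ===== PORT B =====
-- dict comprehension '{j: sum(c[j] for c in lst) for j in base}'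
def pvSumGroup (base : List (String × Int)) (lst : List (List (String × Int))) : List (String × Int) :=
  (base.foldl
    (fun (t : PySem.Dict String Int) j =>
      t.insert j.1 ((lst.map (fun c => (PySem.Dict.mk c).getD j.1 0)).sum))
    PySem.Dict.empty).items

-- 'groups.setdefault(fcm[i], []).append(tsc[i])' = modify at the key with default []
def combineDuplicates_alt (finalizedCompletedMatch : List (String × String)) (TestSequenceCount : List (String × List (String × Int))) : List (String × List (String × Int)) :=
  let groups := (finalizedCompletedMatch.map (fun p => p.1)).foldl
    (fun (g : PySem.Dict String (List (List (String × Int)))) i =>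
      g.modify ((PySem.Dict.mk finalizedCompletedMatch).getD i "") []
        (fun l => l ++ [(PySem.Dict.mk TestSequenceCount).getD i []]))
    PySem.Dict.empty
  (groups.items.foldl
    (fun (r : PySem.Dict String (List (String × Int))) q =>
      let lst := q.2
      let base := lst.headD []
      if lst.length == 1 then r.insert q.1 base
      else r.insert q.1 (pvSumGroup base lst))
    PySem.Dict.empty).items

-- ===== PRECONDITION & SPEC =====
-- Pre_ excludes (a) association lists with duplicate keys at either dict level, which do not
-- encode a Python dict (the arguments are dicts, so keys are unique), and (b) the inputs on
-- which Python A raises KeyError: a key of finalizedCompletedMatch missing from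
-- TestSequenceCount, or a later same-OTU count dict missing a key of the group's first one.
def Pre_combineDuplicates (finalizedCompletedMatch : List (String × String)) (TestSequenceCount : List (String × List (String × Int))) : Prop :=
  (finalizedCompletedMatch.map (fun p => p.1)).Nodup ∧
  (TestSequenceCount.map (fun p => p.1)).Nodup ∧
  (∀ p ∈ TestSequenceCount, (p.2.map (fun q => q.1)).Nodup) ∧
  (∀ p ∈ finalizedCompletedMatch, p.1 ∈ TestSequenceCount.map (fun q => q.1)) ∧
  (∀ p ∈ finalizedCompletedMatch,
    ∀ j ∈ ((PySem.Dict.mk TestSequenceCount).getD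
            (((finalizedCompletedMatch.find? (fun r => r.2 == p.2)).getD p).1) []).map (fun q => q.1),
      j ∈ ((PySem.Dict.mk TestSequenceCount).getD p.1 []).map (fun q => q.1))
instance (finalizedCompletedMatch : List (String × String)) (TestSequenceCount : List (String × List (String × Int))) : Decidable (Pre_combineDuplicates finalizedCompletedMatch TestSequenceCount) := by unfold Pre_combineDuplicates; infer_instance

def pvWitness_combineDuplicates : (List (String × String)) × (List (String × List (String × Int))) :=
  ([("s1", "otuA"), ("s2", "otuA"), ("s3", "otuB")],
   [("s1", [("a", 1), ("b", 2)]), ("s2", [("a", 4), ("b", 5), ("c", 6)]), ("s3", [("x", 7)])])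

def Spec_combineDuplicates (finalizedCompletedMatch : List (String × String)) (TestSequenceCount : List (String × List (String × Int))) (out : List (String × List (String × Int))) : Prop := out = combineDuplicates_alt finalizedCompletedMatch TestSequenceCount
instance (finalizedCompletedMatch : List (String × String)) (TestSequenceCount : List (String × List (String × Int))) (out : List (String × List (String × Int))) : Decidable (Spec_combineDuplicates finalizedCompletedMatch TestSequenceCount out) := by unfold Spec_combineDuplicates; infer_instance

-- ===== CLAIM (what is proved, stated in full; the proofs are below) =====
def Claim_equal_combineDuplicates : Prop := ∀ (finalizedCompletedMatch : List (String × String)) (TestSequenceCount : List (String × List (String × Int))), Dom_combineDuplicates finalizedCompletedMatch TestSequenceCount → Pre_combineDuplicates finalizedCompletedMatch TestSequenceCount → Spec_combineDuplicates finalizedCompletedMatch TestSequenceCount (combineDuplicates finalizedCompletedMatch TestSequenceCount)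

-- ===== LEMMAS AND PROOFS =====

-- the (otuID, counts) pair A and B both read off an entry of finalizedCompletedMatch
def pvPrep (finalizedCompletedMatch : List (String × String)) (TestSequenceCount : List (String × List (String × Int))) : List (String × List (String × Int)) :=
  finalizedCompletedMatch.map (fun p =>
    ((PySem.Dict.mk finalizedCompletedMatch).getD p.1 "",
     (PySem.Dict.mk TestSequenceCount).getD p.1 []))

def pvStepA (d : PySem.Dict String (List (String × Int))) (p : String × List (String × Int)) : PySem.Dict String (List (String × Int)) :=
  if d.contains p.1 then d.insert p.1 (pvMerge p.2 (d.getD p.1 [])) else d.insert p.1 p.2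

def pvChain : List (List (String × Int)) → List (String × Int)
  | [] => []
  | c :: cs => cs.foldl (fun acc c' => pvMerge c' acc) c

def pvGrp (l : List (String × List (String × Int))) (o : String) : List (List (String × Int)) :=
  (l.filter (fun p => p.1 == o)).map (fun p => p.2)

def pvCombine (lst : List (List (String × Int))) : List (String × Int) :=
  if lst.length == 1 then lst.headD [] else pvSumGroup (lst.headD []) lst

lemma pvGrp_append (l : List (String × List (String × Int))) (x : String × List (String × Int)) (o : String) :
    pvGrp (l ++ [x]) o = pvGrp l o ++ (if x.1 == o then [x.2] else []) := by
  simp only [pvGrp, List.filter_append, List.map_append]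
  by_cases h : x.1 == o <;> simp [List.filter, h]

lemma pvGrp_nil_of_not_mem (l : List (String × List (String × Int))) (o : String)
    (h : o ∉ l.map (fun p => p.1)) : pvGrp l o = [] := by
  simp only [pvGrp, List.map_eq_nil_iff, List.filter_eq_nil_iff]
  intro p hp
  simp only [beq_iff_eq]
  exact fun he => h (he ▸ List.mem_map_of_mem hp)

lemma pvGrp_ne_nil_of_mem (l : List (String × List (String × Int))) (o : String)
    (h : o ∈ l.map (fun p => p.1)) : pvGrp l o ≠ [] := by
  obtain ⟨p, hp, he⟩ := List.mem_map.mp h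
  simp only [pvGrp, ne_eq, List.map_eq_nil_iff, List.filter_eq_nil_iff]
  intro hc
  exact (hc p hp) (by simp [he])

lemma pvChain_append_singleton (g : List (List (String × Int))) (c : List (String × Int))
    (h : g ≠ []) : pvChain (g ++ [c]) = pvMerge c (pvChain g) := by
  obtain ⟨c1, cs, rfl⟩ := List.exists_cons_of_ne_nil h
  simp [pvChain, List.foldl_append]

lemma pvGetD_self (c : List (String × Int)) (q : String × Int) (hq : q ∈ c)
    (hn : (c.map (fun q => q.1)).Nodup) : (PySem.Dict.mk c).getD q.1 0 = q.2 := by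
  exact PySem.Dict.getD_of_mem_items (PySem.Dict.mk c) (k := q.1) (v := q.2) (by simpa using hq)
    (by simpa [PySem.Dict.keys] using hn) 0

lemma pvMerge_items (c stored : List (String × Int))
    (h : (stored.map (fun q => q.1)).Nodup) :
    pvMerge c stored = stored.map (fun q => (q.1, (PySem.Dict.mk c).getD q.1 0 + q.2)) := by
  unfold pvMerge
  rw [PySem.Dict.items_foldl_insert_fresh stored (fun q => q.1)
    (fun q => (PySem.Dict.mk c).getD q.1 0 + (PySem.Dict.mk stored).getD q.1 0)
    PySem.Dict.empty (fun a _ => PySem.Dict.contains_empty _) h]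
  simp only [PySem.Dict.empty, List.nil_append]
  exact List.map_congr_left (fun q hq => by rw [pvGetD_self stored q hq h])

lemma pvSumGroup_items (base : List (String × Int)) (lst : List (List (String × Int)))
    (h : (base.map (fun q => q.1)).Nodup) :
    pvSumGroup base lst = base.map (fun q => (q.1, (lst.map (fun c => (PySem.Dict.mk c).getD q.1 0)).sum)) := by
  unfold pvSumGroup
  rw [PySem.Dict.items_foldl_insert_fresh base (fun q => q.1)
    (fun q => (lst.map (fun c => (PySem.Dict.mk c).getD q.1 0)).sum)
    PySem.Dict.empty (fun a _ => PySem.Dict.contains_empty _) h]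
  simp [PySem.Dict.empty]

lemma pvChain_merged (c1 : List (String × Int)) (cs : List (List (String × Int)))
    (h1 : (c1.map (fun q => q.1)).Nodup) :
    pvChain (c1 :: cs) = c1.map (fun q => (q.1, q.2 + (cs.map (fun c => (PySem.Dict.mk c).getD q.1 0)).sum)) := by
  induction cs using List.reverseRecOn with
  | nil => simp [pvChain]
  | append_singleton cs c ih =>
    have : c1 :: (cs ++ [c]) = (c1 :: cs) ++ [c] := by simp
    rw [this, pvChain_append_singleton _ _ (by simp), ih]
    rw [pvMerge_items c _ (by simp [List.map_map]; exact h1)]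
    rw [List.map_map]
    refine List.map_congr_left (fun q hq => ?_)
    simp only [Function.comp_def, List.map_append, List.sum_append, List.map_cons, List.sum_cons,
      List.map_nil, List.sum_nil, Prod.mk.injEq, true_and]
    ring

lemma pvChain_eq_pvCombine (g : List (List (String × Int))) (hne : g ≠ [])
    (hn : ∀ c ∈ g, (c.map (fun q => q.1)).Nodup) :
    pvChain g = pvCombine g := by
  obtain ⟨c1, cs, rfl⟩ := List.exists_cons_of_ne_nil hne
  cases cs with
  | nil => simp [pvChain, pvCombine]
  | cons c2 cs' =>
    have h1 : (c1.map (fun q => q.1)).Nodup := hn c1 (by simp)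
    rw [pvChain_merged c1 _ h1]
    unfold pvCombine
    simp only [List.length_cons, List.headD_cons]
    rw [if_neg (by simp)]
    rw [pvSumGroup_items c1 _ h1]
    refine List.map_congr_left (fun q hq => ?_)
    simp only [List.map_cons, List.sum_cons, pvGetD_self c1 q hq h1]

-- A's loop, characterised: keys in first-appearance order, each value the merge chain of its group
lemma pvA_items (l : List (String × List (String × Int))) :
    (l.foldl pvStepA PySem.Dict.empty).items =
      (PySem.Set.ofList (l.map (fun p => p.1))).map (fun o => (o, pvChain (pvGrp l o))) := by
  induction l using List.reverseRecOn with
  | nil => simp [PySem.Dict.empty, PySem.Set.ofList]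
  | append_singleton l x ih =>
    rw [List.foldl_append, List.foldl_cons, List.foldl_nil]
    set d := l.foldl pvStepA PySem.Dict.empty with hd
    have hkeys : d.keys = PySem.Set.ofList (l.map (fun p => p.1)) := by
      show d.items.map (fun p => p.1) = _
      rw [ih, List.map_map]; simp [Function.comp_def]
    have hnd : d.keys.Nodup := by rw [hkeys]; exact PySem.Set.nodup_ofList _
    have hset : PySem.Set.ofList ((l ++ [x]).map (fun p => p.1)) =
        (PySem.Set.ofList (l.map (fun p => p.1))).add x.1 := by
      rw [List.map_append, PySem.Set.ofList_append]
      simp [PySem.Set.update_cons, PySem.Set.update_nil]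
    by_cases hmem : x.1 ∈ PySem.Set.ofList (l.map (fun p => p.1))
    · have hcont : d.contains x.1 = true :=
        (PySem.Dict.contains_iff_mem_keys d x.1).mpr (hkeys ▸ hmem)
      have hget : d.getD x.1 [] = pvChain (pvGrp l x.1) := by
        refine PySem.Dict.getD_of_mem_items d ?_ hnd []
        rw [ih]; exact List.mem_map_of_mem hmem
      rw [pvStepA, if_pos hcont, PySem.Dict.items_insert_of_contains d _ hcont, ih, hset,
        PySem.Set.add, if_pos (by simpa using hmem), List.map_map]
      refine List.map_congr_left (fun o ho => ?_)
      simp only [Function.comp]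
      by_cases heq : o = x.1
      · subst heq
        rw [if_pos (by simp), hget, pvGrp_append, if_pos (by simp)]
        rw [pvChain_append_singleton _ _ (pvGrp_ne_nil_of_mem l x.1 ((PySem.Set.mem_ofList _ _).mp hmem))]
      · rw [if_neg (by simp [heq]), pvGrp_append, if_neg (by simp [Ne.symm heq])]
        simp
    · have hcont : d.contains x.1 = false := by
        rw [← Bool.not_eq_true]
        exact fun hc => hmem (hkeys ▸ (PySem.Dict.contains_iff_mem_keys d x.1).mp hc)
      rw [pvStepA, if_neg (by simp [hcont]), PySem.Dict.items_insert_of_not_contains d _ hcont, ih,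
        hset, PySem.Set.add, if_neg (by simpa using hmem), List.map_append]
      congr 1
      · refine List.map_congr_left (fun o ho => ?_)
        have hno : o ≠ x.1 := fun he => hmem (he ▸ ho)
        rw [pvGrp_append, if_neg (by simp [Ne.symm hno])]
        simp
      · have : pvGrp (l ++ [x]) x.1 = [x.2] := by
          rw [pvGrp_append, if_pos (by simp),
            pvGrp_nil_of_not_mem l x.1 (fun h => hmem ((PySem.Set.mem_ofList _ _).mpr h))]
          simp
        simp [this, pvChain]

-- B's two passes, characterised the same way
lemma pvB_items (l : List (String × List (String × Int))) :
    (((l.foldl (fun g p => g.modify p.1 [] (fun v => v ++ [p.2])) PySem.Dict.empty).items).foldl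
       (fun (r : PySem.Dict String (List (String × Int))) q =>
          if q.2.length == 1 then r.insert q.1 (q.2.headD []) else r.insert q.1 (pvSumGroup (q.2.headD []) q.2))
       PySem.Dict.empty).items =
      (PySem.Set.ofList (l.map (fun p => p.1))).map (fun o => (o, pvCombine (pvGrp l o))) := by
  set g := l.foldl (fun g p => g.modify p.1 [] (fun v => v ++ [p.2])) PySem.Dict.empty with hg
  have hkeys : g.keys = PySem.Set.ofList (l.map (fun p => p.1)) := by
    rw [hg, PySem.Dict.keys_foldl_modify_key l (fun p => p.1) [] (fun _ p v => v ++ [p.2])]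
    simp [PySem.Dict.keys, PySem.Dict.empty, PySem.Set.update_nil_left]
  have hnd : g.keys.Nodup := by rw [hkeys]; exact PySem.Set.nodup_ofList _
  have hget : ∀ o, g.getD o [] = pvGrp l o := by
    intro o
    rw [hg, PySem.Dict.getD_foldl_modify_append l PySem.Dict.empty o]
    simp [PySem.Dict.getD, PySem.Dict.get?, PySem.Dict.empty, pvGrp]
  have hstep : (fun (r : PySem.Dict String (List (String × Int))) (q : String × List (List (String × Int))) =>
      if q.2.length == 1 then r.insert q.1 (q.2.headD []) else r.insert q.1 (pvSumGroup (q.2.headD []) q.2)) =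
      fun r q => r.insert q.1 (pvCombine q.2) := by
    funext r q
    unfold pvCombine
    by_cases h : q.2.length == 1 <;> simp [h]
  rw [hstep, PySem.Dict.items_foldl_insert_fresh g.items (fun q => q.1) (fun q => pvCombine q.2)
    PySem.Dict.empty (fun a _ => PySem.Dict.contains_empty _) hnd]
  rw [PySem.Dict.items_eq_map_keys g hnd [], hkeys]
  simp only [PySem.Dict.empty, List.nil_append, List.map_map]
  exact List.map_congr_left (fun o ho => by simp [Function.comp, hget o])

lemma pvCounts_nodup (tsc : List (String × List (String × Int)))
    (h3 : ∀ p ∈ tsc, (p.2.map (fun q => q.1)).Nodup) (k : String) :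
    (((PySem.Dict.mk tsc).getD k []).map (fun q => q.1)).Nodup := by
  rcases hg : (PySem.Dict.mk tsc).get? k with _ | v
  · simp [PySem.Dict.getD_eq_get?_getD, hg]
  · rw [PySem.Dict.getD_eq_get?_getD, hg]
    have hmem := PySem.Dict.mem_items_of_get?_eq_some _ hg
    exact h3 (k, v) (by simpa [PySem.Dict.items] using hmem)

theorem combineDuplicates_spec : Claim_equal_combineDuplicates := by
  intro fcm tsc _ hpre
  obtain ⟨h1, h2, h3, h4, h5⟩ := hpre
  unfold Spec_combineDuplicates
  have hA : combineDuplicates fcm tsc = ((pvPrep fcm tsc).foldl pvStepA PySem.Dict.empty).items := by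
    unfold combineDuplicates pvPrep pvStepA
    rw [List.foldl_map, List.foldl_map]
  have hB : combineDuplicates_alt fcm tsc =
      (PySem.Set.ofList ((pvPrep fcm tsc).map (fun p => p.1))).map
        (fun o => (o, pvCombine (pvGrp (pvPrep fcm tsc) o))) := by
    rw [← pvB_items (pvPrep fcm tsc)]
    unfold combineDuplicates_alt pvPrep
    rw [List.foldl_map, List.foldl_map]
  rw [hA, hB, pvA_items]
  refine List.map_congr_left (fun o ho => ?_)
  have hne := pvGrp_ne_nil_of_mem _ o ((PySem.Set.mem_ofList _ _).mp ho)
  have hnod : ∀ c ∈ pvGrp (pvPrep fcm tsc) o, (c.map (fun q => q.1)).Nodup := by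
    intro c hc
    obtain ⟨p, hp, he⟩ := List.mem_map.mp hc
    have hp' : p ∈ pvPrep fcm tsc := List.mem_of_mem_filter hp
    obtain ⟨p0, _, he0⟩ := List.mem_map.mp hp'
    have : c = (PySem.Dict.mk tsc).getD p0.1 [] := by rw [← he, ← he0]
    rw [this]
    exact pvCounts_nodup tsc h3 p0.1
  rw [pvChain_eq_pvCombine _ hne hnod]
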